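-- pv_equiv track=rewrite | github.com/AmaanIlahi/Elara.ai | backend/app/services/scheduling_service.py | parse_time_choice
-- ===== SOURCE A (Python) =====
-- from typing import Optional, Dict, Any, List, Tuple
--
-- def normalize_time_text(value: str) -> str:
--     return value.lower().replace(" ", "").replace(".", "")
--
-- def parse_time_choice(user_message: str, slots: List[Dict[str, str]]) -> Optional[int]:
--     normalized_input = normalize_time_text(user_message.strip())
--
--     for idx, slot in enumerate(slots, start=1):
--         slot_time_normalized = normalize_time_text(slot["time"])
--
--         if normalized_input == slot_time_normalized:
--             return idx
--
--         # Support "9am" for "09:00 AM"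
--         simplified_slot_time = slot_time_normalized.replace(":00", "")
--         if normalized_input == simplified_slot_time:
--             return idx
--
--     return None
-- ===== SOURCE B (Python) =====
-- from typing import Optional, Dict, List
--
--
-- def normalize_time_text(value: str) -> str:
--     return value.lower().replace(" ", "").replace(".", "")
--
--
-- def parse_time_choice(user_message: str, slots: List[Dict[str, str]]) -> Optional[int]:
--     # Staged passes: normalize all slot times, derive the ':00'-stripped variants,
--     # locate the target's first position in each list, and combine with min.
--     # Correct because A's first slot matching either form is exactly the minimum
--     # of the two first-match positions.
--     target = normalize_time_text(user_message.strip())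
--     exact_times = [normalize_time_text(slot["time"]) for slot in slots]
--     simple_times = [t.replace(":00", "") for t in exact_times]
--     candidates = []
--     if target in exact_times:
--         candidates.append(exact_times.index(target))
--     if target in simple_times:
--         candidates.append(simple_times.index(target))
--     if not candidates:
--         return None
--     return min(candidates) + 1
-- ===== Notes on version B (the rewrite author's own statement) =====
-- stated objective: alternative
-- what changed: B replaces A's single scan with inline comparisons by staged passes: it builds the list of normalized slot times and the list of their ':00'-stripped variants, finds the first index of the normalized input in each list separately, and returns min of the two hit positions plus 1 (None if neither list contains it).
-- outside the precondition, e.g. on parse_time_choice('9am', [{'time': '9 AM'}, {}]): A returns 1, B raises KeyError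
import Mathlib
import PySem

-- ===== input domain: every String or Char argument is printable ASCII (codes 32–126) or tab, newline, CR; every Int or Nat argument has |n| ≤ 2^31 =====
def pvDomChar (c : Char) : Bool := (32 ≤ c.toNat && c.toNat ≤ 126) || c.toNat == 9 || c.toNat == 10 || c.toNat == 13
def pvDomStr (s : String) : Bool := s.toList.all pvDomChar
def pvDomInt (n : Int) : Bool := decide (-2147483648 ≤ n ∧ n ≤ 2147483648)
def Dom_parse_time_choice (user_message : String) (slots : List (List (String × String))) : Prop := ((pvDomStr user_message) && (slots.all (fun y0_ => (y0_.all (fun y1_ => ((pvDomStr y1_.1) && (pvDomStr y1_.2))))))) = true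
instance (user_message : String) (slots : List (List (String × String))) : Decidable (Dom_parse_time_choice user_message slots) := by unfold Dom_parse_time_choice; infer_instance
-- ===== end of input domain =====

-- B replaces A's scan-and-compare loop with staged passes: two normalized lists,
-- a first-index search in each, combined with min; objective: alternative, no speed claim.

-- ===== PORT A =====

-- normalize_time_text (helper shared by both Pythons)
def pvNormalize (value : String) : String :=
  PySem.Str.replace (PySem.Str.replace (PySem.Str.lower value) " " "") "." ""

-- A's for-loop over enumerate(slots, start=1); slot["time"] missing = KeyError,
-- excluded by Pre_ (the port returns none there, outside the claim)
def pvA_loop (ninput : String) : List (List (String × String)) → Int → Option Int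
  | [], _ => none
  | slot :: rest, idx =>
    match List.lookup "time" slot with
    | none => none
    | some t =>
      let slot_time_normalized := pvNormalize t
      if ninput == slot_time_normalized then some idx
      else
        let simplified_slot_time := PySem.Str.replace slot_time_normalized ":00" ""
        if ninput == simplified_slot_time then some idx
        else pvA_loop ninput rest (idx + 1)

def parse_time_choice (user_message : String) (slots : List (List (String × String))) : Option Int :=
  pvA_loop (pvNormalize (PySem.Str.strip user_message)) slots 1

-- ===== PORT B =====

-- Source B's staged passes: the two comprehensions, the two `in`/`.index` probes
-- (one PySem.List.index? each), min over the candidate list, then +1.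
-- slot["time"] missing = KeyError in Python B, excluded by Pre_ (getD "" here).
def parse_time_choice_alt (user_message : String) (slots : List (List (String × String))) : Option Int :=
  let target := pvNormalize (PySem.Str.strip user_message)
  let exact_times := slots.map (fun slot => pvNormalize ((List.lookup "time" slot).getD ""))
  let simple_times := exact_times.map (fun t => PySem.Str.replace t ":00" "")
  let candidates : List Nat :=
    (match PySem.List.index? exact_times target with | some i => [i] | none => []) ++
    (match PySem.List.index? simple_times target with | some j => [j] | none => [])
  match PySem.List.min? candidates (fun x => x) with
  | none => none
  | some m => some ((m : Int) + 1)

-- ===== PRECONDITION & SPEC =====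
-- Pre_ excludes slot lists in which some slot lacks the "time" key: Python A raises
-- KeyError on reaching such a slot (and even where an earlier slot matches first and A
-- returns, Python B itself raises KeyError in its comprehension over all slots).
def Pre_parse_time_choice (user_message : String) (slots : List (List (String × String))) : Prop :=
  slots.all (fun slot => slot.any (fun p => p.1 == "time")) = true
instance (user_message : String) (slots : List (List (String × String))) : Decidable (Pre_parse_time_choice user_message slots) := by unfold Pre_parse_time_choice; infer_instance

def pvWitness_parse_time_choice : String × (List (List (String × String))) :=
  ("9 AM", [[("time", "09:00 AM")], [("time", "10:00 AM")]])

def Spec_parse_time_choice (user_message : String) (slots : List (List (String × String))) (out : Option Int) : Prop := out = parse_time_choice_alt user_message slots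
instance (user_message : String) (slots : List (List (String × String))) (out : Option Int) : Decidable (Spec_parse_time_choice user_message slots out) := by unfold Spec_parse_time_choice; infer_instance

-- ===== CLAIM (what is proved, stated in full; the proofs are below) =====
def Claim_equal_parse_time_choice : Prop := ∀ (user_message : String) (slots : List (List (String × String))), Dom_parse_time_choice user_message slots → Pre_parse_time_choice user_message slots → Spec_parse_time_choice user_message slots (parse_time_choice user_message slots)

-- ===== LEMMAS AND PROOFS =====

-- combine the two first-match positions the way B's candidates/min stage does
def pvComb (o1 o2 : Option Nat) : Option Nat :=
  match o1, o2 with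
  | none, none => none
  | some i, none => some i
  | none, some j => some j
  | some i, some j => some (min i j)

theorem pvComb_eq_min (o1 o2 : Option Nat) :
    PySem.List.min?
      ((match o1 with | some i => [i] | none => []) ++
       (match o2 with | some j => [j] | none => [])) (fun x => x) = pvComb o1 o2 := by
  rcases o1 with _ | i <;> rcases o2 with _ | j <;>
    simp [pvComb, PySem.List.min?_id_cons, PySem.List.min?_eq_none_iff]

theorem pvComb_zero_left (o : Option Nat) : pvComb (some 0) o = some 0 := by
  rcases o with _ | j <;> simp [pvComb]

theorem pvComb_zero_right (o : Option Nat) : pvComb o (some 0) = some 0 := by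
  rcases o with _ | i <;> simp [pvComb]

theorem pvComb_map_succ (o1 o2 : Option Nat) :
    pvComb (o1.map (· + 1)) (o2.map (· + 1)) = (pvComb o1 o2).map (· + 1) := by
  rcases o1 with _ | i <;> rcases o2 with _ | j <;> simp [pvComb]

-- a slot whose key list contains "time" has a successful lookup
theorem pv_lookup_time (slot : List (String × String))
    (h : slot.any (fun p => p.1 == "time") = true) :
    ∃ t, List.lookup "time" slot = some t := by
  induction slot with
  | nil => simp at h
  | cons p rest ih =>
    rcases hp : (p.1 == "time") with _ | _
    · simp only [List.any_cons, hp, Bool.false_or] at h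
      obtain ⟨t, ht⟩ := ih h
      have hne : ("time" == p.1) = false := by
        rcases hq : ("time" == p.1) with _|_
        · rfl
        · rw [(beq_iff_eq).mp hq] at hp; simp at hp
      exact ⟨t, by simp [List.lookup, hne, ht]⟩
    · exact ⟨p.2, by simp [List.lookup, ((beq_iff_eq).mp hp).symm]⟩

-- the core correspondence: A's scan from idx equals B's combined first-match
-- positions shifted by idx
theorem pvA_loop_eq_comb (t : String) :
    ∀ (slots : List (List (String × String))) (idx : Int),
      slots.all (fun slot => slot.any (fun p => p.1 == "time")) = true →
      pvA_loop t slots idx =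
        (pvComb
          (PySem.List.index? (slots.map (fun slot => pvNormalize ((List.lookup "time" slot).getD ""))) t)
          (PySem.List.index? ((slots.map (fun slot => pvNormalize ((List.lookup "time" slot).getD ""))).map
              (fun s => PySem.Str.replace s ":00" "")) t)).map (fun m => idx + (m : Int))
  | [], idx, _ => by simp [pvA_loop, PySem.List.index?, pvComb]
  | slot :: rest, idx, hpre => by
    simp only [List.all_cons, Bool.and_eq_true] at hpre
    obtain ⟨hslot, hrest⟩ := hpre
    obtain ⟨t0, ht0⟩ := pv_lookup_time slot hslot
    simp only [pvA_loop, ht0, List.map_cons, Option.getD_some]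
    by_cases h1 : t == pvNormalize t0
    · have h1' : pvNormalize t0 = t := ((beq_iff_eq).mp h1).symm
      rw [h1', PySem.List.index?_cons_self, pvComb_zero_left]
      simp
    · have h1ne : pvNormalize t0 ≠ t := fun hh => by simp [hh] at h1
      rw [PySem.List.index?_cons_of_ne _ h1ne]
      by_cases h2 : t == PySem.Str.replace (pvNormalize t0) ":00" ""
      · have h2' : PySem.Str.replace (pvNormalize t0) ":00" "" = t := ((beq_iff_eq).mp h2).symm
        rw [h2', PySem.List.index?_cons_self, pvComb_zero_right]
        simp [h1]
      · have h2ne : PySem.Str.replace (pvNormalize t0) ":00" "" ≠ t := fun hh => by simp [hh] at h2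
        rw [PySem.List.index?_cons_of_ne _ h2ne]
        simp only [h1, Bool.false_eq_true, if_false, h2, if_false]
        rw [pvA_loop_eq_comb t rest (idx + 1) hrest, pvComb_map_succ]
        rcases pvComb (PySem.List.index? (rest.map (fun slot => pvNormalize ((List.lookup "time" slot).getD ""))) t)
            (PySem.List.index? ((rest.map (fun slot => pvNormalize ((List.lookup "time" slot).getD ""))).map (fun s => PySem.Str.replace s ":00" "")) t) with _ | m
        · simp
        · simp; omega

-- ===== VERDICT (by name: the statement is the Claim_ definition above) =====
theorem parse_time_choice_spec : Claim_equal_parse_time_choice := by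
  intro user_message slots _ hpre
  unfold Spec_parse_time_choice parse_time_choice parse_time_choice_alt
  rw [pvA_loop_eq_comb _ slots 1 hpre]
  simp only [pvComb_eq_min]
  rcases pvComb (PySem.List.index? (slots.map (fun slot => pvNormalize ((List.lookup "time" slot).getD ""))) (pvNormalize (PySem.Str.strip user_message)))
      (PySem.List.index? ((slots.map (fun slot => pvNormalize ((List.lookup "time" slot).getD ""))).map (fun s => PySem.Str.replace s ":00" "")) (pvNormalize (PySem.Str.strip user_message))) with _ | m
  · simp
  · simp; omega
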